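-- pv_equiv track=rewrite | github.com/Okashanadeem/LearnByFun | Caeser Cipher/caeserCipherDecode.py | reverse_number_rotation
-- ===== SOURCE A (Python) =====
-- def reverse_number_rotation(text):
--     """Step 4: Reverse ROT5 on numbers (subtract 5)"""
--     result = []
--     for ch in text:
--         if ch.isdigit():
--             # Reverse ROT5: subtract 5 instead of adding 5
--             original = str((int(ch) - 5) % 10)
--             result.append(original)
--         else:
--             result.append(ch)
--     return ''.join(result)
-- ===== SOURCE B (Python) =====
-- def reverse_number_rotation(text):
--     """Step 4: Reverse ROT5 on numbers (subtract 5)"""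
--     # Subtracting 5 mod 10 is an involution that swaps the digit pairs
--     # (0,5), (1,6), (2,7), (3,8), (4,9): perform each swap as three staged
--     # whole-string replace passes through a sentinel character.
--     for low in "01234":
--         high = chr(ord(low) + 5)
--         text = text.replace(low, "\x00").replace(high, low).replace("\x00", high)
--     return text
-- ===== Notes on version B (the rewrite author's own statement) =====
-- stated objective: alternative
-- what changed: B drops the per-character digit arithmetic entirely: decoding ROT5 is an involution that swaps the digit pairs (0,5)..(4,9), so B performs five staged whole-string swap passes, each done as three str.replace calls through a sentinel character; the replace passes run in C, removing the Python-level per-character loop.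
import Mathlib
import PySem

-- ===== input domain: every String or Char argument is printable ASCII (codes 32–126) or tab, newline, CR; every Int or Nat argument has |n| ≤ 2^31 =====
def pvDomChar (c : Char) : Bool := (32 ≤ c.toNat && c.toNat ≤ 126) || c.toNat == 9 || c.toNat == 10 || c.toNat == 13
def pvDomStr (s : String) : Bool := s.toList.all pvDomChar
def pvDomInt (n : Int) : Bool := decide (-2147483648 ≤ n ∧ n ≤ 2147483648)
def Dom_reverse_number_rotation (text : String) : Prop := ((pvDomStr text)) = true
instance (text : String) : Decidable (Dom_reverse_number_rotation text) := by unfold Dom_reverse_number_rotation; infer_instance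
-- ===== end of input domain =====

-- B replaces A's per-character decode loop by five staged whole-string swap passes
-- (ROT5 decoding is an involution pairing each digit d with d+5), each swap done as
-- three replace passes through a sentinel; alternative algorithm, same O(n) cost.

-- ===== PORT A =====
-- the loop: branch per character, append the decoded digit string or the character itself
def reverse_number_rotation (text : String) : String :=
  let result : List Char :=
    text.toList.foldl (fun acc ch =>
      if PySem.Chars.isdigit ch then
        acc ++ PySem.Int.toChars (PySem.Int.mod (((PySem.Int.ofChars? [ch]).getD 0) - 5) 10)
      else
        acc ++ [ch]) []
  String.mk result

-- ===== PORT B =====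
-- one swap pass of Source B: text.replace(low,'\x00').replace(high,low).replace('\x00',high)
def rnrSwapPass (s : List Char) (low : Char) : List Char :=
  let high := Char.ofNat (low.toNat + 5)
  PySem.Chars.replace
    (PySem.Chars.replace (PySem.Chars.replace s [low] ['\x00']) [high] [low])
    ['\x00'] [high]

-- the for-loop of Source B over "01234"
def reverse_number_rotation_alt (text : String) : String :=
  String.mk ("01234".toList.foldl rnrSwapPass text.toList)

-- ===== PRECONDITION & SPEC =====
def Spec_reverse_number_rotation (text : String) (out : String) : Prop := out = reverse_number_rotation_alt text
instance (text : String) (out : String) : Decidable (Spec_reverse_number_rotation text out) := by unfold Spec_reverse_number_rotation; infer_instance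

-- ===== CLAIM (what is proved, stated in full; the proofs are below) =====
def Claim_equal_reverse_number_rotation : Prop := ∀ (text : String), Dom_reverse_number_rotation text → Spec_reverse_number_rotation text (reverse_number_rotation text)

-- ===== LEMMAS AND PROOFS =====

-- single-character replace is a pointwise map
theorem rnr_replace_go_single (a b : Char) :
    ∀ (fuel : Nat) (s acc : List Char), s.length ≤ fuel →
      PySem.Chars.replace.go [a] [b] fuel s acc
        = acc.reverse ++ s.map (fun c => if c = a then b else c) := by
  intro fuel
  induction fuel with
  | zero =>
    intro s acc h
    have : s = [] := List.eq_nil_of_length_eq_zero (Nat.le_zero.mp h)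
    subst this; simp [PySem.Chars.replace.go]
  | succ n ih =>
    intro s acc h
    cases s with
    | nil => simp [PySem.Chars.replace.go]
    | cons c t =>
      simp only [PySem.Chars.replace.go]
      by_cases hc : c = a
      · subst hc
        have hp : List.isPrefixOf [c] (c :: t) = true := by
          simp [List.isPrefixOf]
        simp only [hp, if_pos]
        rw [show List.drop [c].length (c :: t) = t from rfl,
            ih t ([b].reverse ++ acc) (by simp at h; omega)]
        simp
      · have hp : List.isPrefixOf [a] (c :: t) = false := by
          simp [List.isPrefixOf]; exact fun he => absurd he.symm hc
        rw [hp]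
        simp only [Bool.false_eq_true, if_false]
        rw [ih t (c :: acc) (by simp at h; omega)]
        simp [hc]

theorem rnr_replace_single (a b : Char) (s : List Char) :
    PySem.Chars.replace s [a] [b] = s.map (fun c => if c = a then b else c) := by
  simp only [PySem.Chars.replace]
  rw [if_neg (by simp)]
  simpa using rnr_replace_go_single a b s.length s [] (le_refl _)

-- a swap pass is a pointwise map
theorem rnr_swapPass_map (low : Char) (s : List Char) :
    rnrSwapPass s low
      = s.map (fun c =>
          if (if (if c = low then '\x00' else c) = Char.ofNat (low.toNat + 5)
                then low else (if c = low then '\x00' else c)) = '\x00'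
          then Char.ofNat (low.toNat + 5)
          else (if (if c = low then '\x00' else c) = Char.ofNat (low.toNat + 5)
                  then low else (if c = low then '\x00' else c))) := by
  simp only [rnrSwapPass, rnr_replace_single, List.map_map]
  rfl

-- per-character agreement of the two programs on the domain
theorem rnr_char_eq (c : Char) (h : pvDomChar c = true) :
    (if PySem.Chars.isdigit c then
       PySem.Int.toChars (PySem.Int.mod (((PySem.Int.ofChars? [c]).getD 0) - 5) 10)
     else [c])
      = [("01234".toList.foldl rnrSwapPass [c]).headD c] ∧
      ("01234".toList.foldl rnrSwapPass [c]).length = 1 := by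
  have hle : c.toNat ≤ 126 := by
    simp [pvDomChar] at h
    omega
  obtain ⟨n, hn, rfl⟩ : ∃ n, n ≤ 126 ∧ c = Char.ofNat n :=
    ⟨c.toNat, hle, (Char.ofNat_toNat c).symm⟩
  revert h
  interval_cases n <;> decide

-- the swap passes act independently on each character
theorem rnr_foldl_per_char (L : List Char) : ∀ (s : List Char),
    L.foldl rnrSwapPass s = s.map (fun c => (L.foldl rnrSwapPass [c]).headD c) := by
  induction L with
  | nil => intro s; simp
  | cons lo L ih =>
    intro s
    simp only [List.foldl_cons]
    rw [ih (rnrSwapPass s lo), rnr_swapPass_map, List.map_map]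
    apply List.map_congr_left
    intro c _
    simp only [Function.comp_apply]
    rw [rnr_swapPass_map]
    simp only [List.map_cons, List.map_nil]
    rw [ih]
    simp only [List.map_cons, List.map_nil, List.headD_cons]

-- ===== VERDICT (by name: the statement is the Claim_ definition above) =====
theorem reverse_number_rotation_spec : Claim_equal_reverse_number_rotation := by
  intro text hdom
  unfold Spec_reverse_number_rotation reverse_number_rotation reverse_number_rotation_alt
  have h := PySem.List.foldl_append_eq_flatMap
    (l := text.toList) (acc := ([] : List Char))
    (g := fun c => if PySem.Chars.isdigit c then
        PySem.Int.toChars (PySem.Int.mod (((PySem.Int.ofChars? [c]).getD 0) - 5) 10)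
      else [c])
  simp only []
  rw [show (fun (acc : List Char) ch =>
      if PySem.Chars.isdigit ch then
        acc ++ PySem.Int.toChars (PySem.Int.mod (((PySem.Int.ofChars? [ch]).getD 0) - 5) 10)
      else acc ++ [ch]) = (fun acc c => acc ++ (if PySem.Chars.isdigit c then
        PySem.Int.toChars (PySem.Int.mod (((PySem.Int.ofChars? [c]).getD 0) - 5) 10)
      else [c])) from by funext acc c; split <;> rfl]
  rw [h]
  simp only [List.nil_append]
  rw [rnr_foldl_per_char "01234".toList text.toList]
  congr 1
  rw [List.map_eq_flatMap]
  apply List.flatMap_congr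
  intro c hc
  have hdc : pvDomChar c = true := by
    have := hdom
    unfold Dom_reverse_number_rotation pvDomStr at this
    exact (List.all_eq_true.mp this) c hc
  exact (rnr_char_eq c hdc).1
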